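-- pv_equiv track=rewrite | github.com/arora-aditya/aoc2019 | 2019/day13/part2.py | ball_paddle
-- ===== SOURCE A (Python) =====
-- def ball_paddle(board):
--     BALL = None
--     PADDLE = None
--     for i in range(len(board)):
--         for j in range(len(board[i])):
--             if board[i][j] == 'O':
--                 BALL = j
--             if board[i][j] == '_':
--                 PADDLE = j
--     return BALL, PADDLE
-- ===== SOURCE B (Python) =====
-- def ball_paddle(board):
--     ball = None
--     paddle = None
--     for row in reversed(board):
--         for j in range(len(row) - 1, -1, -1):
--             c = row[j]
--             if ball is None and c == 'O':
--                 ball = j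
--             if paddle is None and c == '_':
--                 paddle = j
--             if ball is not None and paddle is not None:
--                 return ball, paddle
--     return ball, paddle
-- ===== Notes on version B (the rewrite author's own statement) =====
-- stated objective: alternative
-- what changed: B scans the board backwards (rows and cells reversed), keeping the first marker column seen from the end for each of 'O' and '_' independently and returning early once both are found, instead of A's full forward sweep that overwrites the last seen columns.
import Mathlib
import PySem

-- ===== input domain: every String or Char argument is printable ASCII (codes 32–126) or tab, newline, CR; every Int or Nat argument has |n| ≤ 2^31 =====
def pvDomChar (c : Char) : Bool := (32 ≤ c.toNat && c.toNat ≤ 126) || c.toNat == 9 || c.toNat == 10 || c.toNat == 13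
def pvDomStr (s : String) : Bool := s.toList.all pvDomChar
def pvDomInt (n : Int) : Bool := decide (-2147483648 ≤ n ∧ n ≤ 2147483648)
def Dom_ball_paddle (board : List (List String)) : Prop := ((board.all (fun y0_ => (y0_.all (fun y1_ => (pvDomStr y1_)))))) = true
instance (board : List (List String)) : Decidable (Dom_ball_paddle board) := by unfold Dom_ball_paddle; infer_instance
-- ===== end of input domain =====

-- B scans the board backwards with early exit instead of A's full forward last-occurrence sweep; alternative decomposition, same result.

-- ===== PORT A =====
-- forward sweep: each matching cell overwrites BALL / PADDLE
def ball_paddle (board : List (List String)) : Option Int × Option Int :=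
  board.foldl
    (fun st row =>
      (PySem.List.enumerate row).foldl
        (fun st2 jc =>
          let st3 := if jc.2 == "O" then (some jc.1, st2.2) else st2
          if jc.2 == "_" then (st3.1, some jc.1) else st3)
        st)
    (none, none)

-- ===== PORT B =====
-- scan one row's cells (given right-to-left) with early return once both found
def bpAltRow : List (Int × String) → Option Int × Option Int → Option Int × Option Int
  | [], st => st
  | jc :: rest, st =>
    let b := if st.1.isNone && jc.2 == "O" then some jc.1 else st.1
    let p := if st.2.isNone && jc.2 == "_" then some jc.1 else st.2
    if b.isSome && p.isSome then (b, p) else bpAltRow rest (b, p)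

-- rows given bottom-to-top; stop as soon as both markers are found
def bpAltRows : List (List String) → Option Int × Option Int → Option Int × Option Int
  | [], st => st
  | row :: rest, st =>
    let st' := bpAltRow (PySem.List.enumerate row).reverse st
    if st'.1.isSome && st'.2.isSome then st' else bpAltRows rest st'

def ball_paddle_alt (board : List (List String)) : Option Int × Option Int :=
  bpAltRows board.reverse (none, none)

-- ===== PRECONDITION & SPEC =====
def Spec_ball_paddle (board : List (List String)) (out : Option Int × Option Int) : Prop := out = ball_paddle_alt board
instance (board : List (List String)) (out : Option Int × Option Int) : Decidable (Spec_ball_paddle board out) := by unfold Spec_ball_paddle; infer_instance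

-- ===== CLAIM (what is proved, stated in full; the proofs are below) =====
def Claim_equal_ball_paddle : Prop := ∀ (board : List (List String)), Dom_ball_paddle board → Spec_ball_paddle board (ball_paddle board)

-- ===== LEMMAS AND PROOFS =====

-- last match (column of the last cell equal to m) in a cell list
def bpLm (m : String) : List (Int × String) → Option Int
  | [] => none
  | jc :: l => (bpLm m l).or (if jc.2 == m then some jc.1 else none)

-- first match in a cell list
def bpFm (m : String) : List (Int × String) → Option Int
  | [] => none
  | jc :: l => (if jc.2 == m then some jc.1 else none).or (bpFm m l)

def bpLmRows (m : String) : List (List String) → Option Int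
  | [] => none
  | r :: rs => (bpLmRows m rs).or (bpLm m (PySem.List.enumerate r))

def bpFmRows (m : String) : List (List String) → Option Int
  | [] => none
  | r :: rs => (bpFm m (PySem.List.enumerate r).reverse).or (bpFmRows m rs)

theorem bp_or_of_isSome {α : Type} {a : Option α} (h : a.isSome) (b : Option α) :
    a.or b = a := by
  cases a
  · simp at h
  · rfl

theorem bpFm_append (m : String) (l₁ l₂ : List (Int × String)) :
    bpFm m (l₁ ++ l₂) = (bpFm m l₁).or (bpFm m l₂) := by
  induction l₁ with
  | nil => rfl
  | cons x l ih => simp [bpFm, ih, Option.or_assoc]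

theorem bpFm_reverse (m : String) (l : List (Int × String)) :
    bpFm m l.reverse = bpLm m l := by
  induction l with
  | nil => rfl
  | cons x l ih =>
    simp only [List.reverse_cons, bpFm_append, ih, bpLm, bpFm, Option.or_none]

-- A's inner fold decomposes componentwise into last-match-or-previous
theorem bpA_inner (m₁ m₂ : String) (l : List (Int × String)) (st : Option Int × Option Int) :
    l.foldl (fun st2 jc =>
        let st3 := if jc.2 == m₁ then (some jc.1, st2.2) else st2
        if jc.2 == m₂ then (st3.1, some jc.1) else st3) st
      = ((bpLm m₁ l).or st.1, (bpLm m₂ l).or st.2) := by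
  induction l generalizing st with
  | nil => simp [bpLm]
  | cons x l ih =>
    simp only [List.foldl_cons, ih, bpLm, Option.or_assoc]
    by_cases h1 : x.2 == m₁ <;> by_cases h2 : x.2 == m₂ <;> simp [h1, h2]

theorem bpA_rows (m₁ m₂ : String) (rows : List (List String)) (st : Option Int × Option Int) :
    rows.foldl (fun st row =>
        (PySem.List.enumerate row).foldl (fun st2 jc =>
          let st3 := if jc.2 == m₁ then (some jc.1, st2.2) else st2
          if jc.2 == m₂ then (st3.1, some jc.1) else st3) st) st
      = ((bpLmRows m₁ rows).or st.1, (bpLmRows m₂ rows).or st.2) := by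
  induction rows generalizing st with
  | nil => simp [bpLmRows]
  | cons r rs ih =>
    rw [List.foldl_cons, bpA_inner, ih]
    simp only [bpLmRows, Option.or_assoc]

-- B's row scan is previous-or-first-match, independently per component
theorem bpAltRow_eq (l : List (Int × String)) (st : Option Int × Option Int) :
    bpAltRow l st = (st.1.or (bpFm "O" l), st.2.or (bpFm "_" l)) := by
  induction l generalizing st with
  | nil => simp [bpAltRow, bpFm]
  | cons x l ih =>
    simp only [bpAltRow]
    have hb : (if st.1.isNone && x.2 == "O" then some x.1 else st.1)
        = st.1.or (if x.2 == "O" then some x.1 else none) := by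
      cases st.1 <;> by_cases hx : x.2 == "O" <;> simp [hx]
    have hp : (if st.2.isNone && x.2 == "_" then some x.1 else st.2)
        = st.2.or (if x.2 == "_" then some x.1 else none) := by
      cases st.2 <;> by_cases hx : x.2 == "_" <;> simp [hx]
    rw [hb, hp]
    by_cases hs : ((st.1.or (if x.2 == "O" then some x.1 else none)).isSome
        && (st.2.or (if x.2 == "_" then some x.1 else none)).isSome) = true
    · rw [if_pos hs]
      simp only [Bool.and_eq_true] at hs
      simp only [bpFm, ← Option.or_assoc, bp_or_of_isSome hs.1, bp_or_of_isSome hs.2]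
    · rw [if_neg hs]
      simp only [ih, bpFm, Option.or_assoc]

theorem bpAltRows_eq (rows : List (List String)) (st : Option Int × Option Int) :
    bpAltRows rows st = (st.1.or (bpFmRows "O" rows), st.2.or (bpFmRows "_" rows)) := by
  induction rows generalizing st with
  | nil => simp [bpAltRows, bpFmRows]
  | cons r rs ih =>
    simp only [bpAltRows, bpAltRow_eq]
    by_cases hs : ((st.1.or (bpFm "O" (PySem.List.enumerate r).reverse)).isSome
        && (st.2.or (bpFm "_" (PySem.List.enumerate r).reverse)).isSome) = true
    · rw [if_pos hs]
      simp only [Bool.and_eq_true] at hs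
      simp only [bpFmRows, ← Option.or_assoc, bp_or_of_isSome hs.1, bp_or_of_isSome hs.2]
    · rw [if_neg hs]
      simp only [ih, bpFmRows, Option.or_assoc]

theorem bpFmRows_append (m : String) (l₁ l₂ : List (List String)) :
    bpFmRows m (l₁ ++ l₂) = (bpFmRows m l₁).or (bpFmRows m l₂) := by
  induction l₁ with
  | nil => rfl
  | cons r rs ih => simp [bpFmRows, ih, Option.or_assoc]

theorem bpFmRows_reverse (m : String) (rows : List (List String)) :
    bpFmRows m rows.reverse = bpLmRows m rows := by
  induction rows with
  | nil => rfl
  | cons r rs ih =>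
    simp only [List.reverse_cons, bpFmRows_append, ih, bpLmRows, bpFmRows,
      bpFm_reverse, Option.or_none]

-- ===== VERDICT (by name: the statement is the Claim_ definition above) =====
theorem ball_paddle_spec : Claim_equal_ball_paddle := by
  intro board _
  unfold Spec_ball_paddle ball_paddle ball_paddle_alt
  rw [bpA_rows, bpAltRows_eq]
  simp [bpFmRows_reverse]
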